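-- pv_equiv track=rewrite | github.com/isma32/Python-Projects | Python Code for File Handling/exo1.py | _split_columns
-- ===== SOURCE A (Python) =====
-- def _split_columns(line: str):
--     """
--     Split a monospaced table row on runs of >=2 spaces or tabs.
--     Keep single spaces inside tokens.
--     """
--     cols = []
--     current = []
--     i = 0
--     n = len(line)
--     while i < n:
--         ch = line[i]
--         if ch == "\t":
--             # treat tab as a column break
--             cols.append("".join(current).rstrip())
--             current = []
--             i += 1
--             # skip consecutive tabs
--             while i < n and line[i] == "\t":
--                 i += 1
--             continue
--         if ch == " ":
--             # count run
--             j = i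
--             while j < n and line[j] == " ":
--                 j += 1
--             run = j - i
--             if run >= 2:
--                 cols.append("".join(current).rstrip())
--                 current = []
--                 i = j
--                 # skip extra spaces beyond the run
--                 while i < n and line[i] == " ":
--                     i += 1
--                 continue
--             else:
--                 current.append(" ")
--                 i += 1
--         else:
--             current.append(ch)
--             i += 1
--     cols.append("".join(current).rstrip())
--     # Trim trailing empties that result from long space runs at EOL
--     while cols and cols[-1] == "":
--         cols.pop()
--     return cols
-- ===== SOURCE B (Python) =====
-- def _split_columns(line: str):
--     """One-pass DFA: fold over characters with a pending-space flag and the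
--     kind of delimiter run we are inside; no index arithmetic, no inner scans."""
--     cols = []
--     cur = ""
--     pend = False   # exactly one space seen so far in the current run
--     delim = ""     # "", "t" (inside a tab run) or "s" (inside a >=2-space run)
--     for ch in line:
--         if ch == "\t":
--             if delim != "t":
--                 cols.append(cur.rstrip())
--                 cur = ""
--                 pend = False
--                 delim = "t"
--         elif ch == " ":
--             if delim == "s":
--                 pass
--             elif pend:
--                 cols.append(cur.rstrip())
--                 cur = ""
--                 pend = False
--                 delim = "s"
--             else:
--                 pend = True
--                 delim = ""
--         else:
--             cur = cur + (" " if pend else "") + ch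
--             pend = False
--             delim = ""
--     cols.append(cur.rstrip())
--     while cols and cols[-1] == "":
--         cols.pop()
--     return cols
-- ===== Notes on version B (the rewrite author's own statement) =====
-- stated objective: alternative
-- what changed: Replaced the index-scanning tokenizer with inner run-skipping while-loops and a per-column char-list join by a single forward pass driven by a small state machine (pending-space flag + current-delimiter kind) that builds each column by string concatenation.
import Mathlib
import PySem

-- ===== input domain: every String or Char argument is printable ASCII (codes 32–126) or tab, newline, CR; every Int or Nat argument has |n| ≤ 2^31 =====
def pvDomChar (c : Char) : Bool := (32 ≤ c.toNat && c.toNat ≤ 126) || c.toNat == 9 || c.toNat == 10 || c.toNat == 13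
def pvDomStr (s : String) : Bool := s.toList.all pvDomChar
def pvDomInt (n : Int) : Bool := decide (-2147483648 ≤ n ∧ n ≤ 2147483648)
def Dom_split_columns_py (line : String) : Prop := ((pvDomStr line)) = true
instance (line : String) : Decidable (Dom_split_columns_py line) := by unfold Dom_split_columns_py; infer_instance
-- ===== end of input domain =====

-- B is a one-pass character state machine replacing A's index-scanning tokenizer; return values proved equal on all inputs.

-- shared by both ports: '"".join(current).rstrip()' / 'p.rstrip()' (both Pythons contain this exact expression)
def pvRstrip (cs : List Char) : String := String.ofList (PySem.Chars.rstrip cs)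

-- shared by both ports: 'while cols and cols[-1] == "": cols.pop()' (identical final loop in both Pythons)
def pvTrimTail (cols : List String) : List String := (cols.reverse.dropWhile (· == "")).reverse

-- ===== PORT A =====
-- A's while-loop over index i, ported as recursion on the remaining suffix (the loop only moves i
-- forward).  A's 'skip consecutive tabs' inner loop is dropWhile; in the space branch A first sets
-- i = j (end of the counted run) and then runs a skip loop that is already past all spaces, so the
-- two together are dropWhile over the run.
def aLoop : List Char → List String → List Char → List String
  | [], cols, current => pvTrimTail (cols ++ [pvRstrip current])
  | ch :: rest, cols, current =>
    if ch = '\t' then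
      aLoop (rest.dropWhile (· = '\t')) (cols ++ [pvRstrip current]) []
    else if ch = ' ' then
      let run := 1 + (rest.takeWhile (· = ' ')).length
      if run ≥ 2 then
        aLoop (rest.dropWhile (· = ' ')) (cols ++ [pvRstrip current]) []
      else
        aLoop rest cols (current ++ [' '])
    else
      aLoop rest cols (current ++ [ch])
termination_by s _ _ => s.length
decreasing_by
  · exact Nat.lt_succ_of_le (List.length_dropWhile_le _ _)
  · exact Nat.lt_succ_of_le (List.length_dropWhile_le _ _)
  · simp
  · simp

def split_columns_py (line : String) : List String := aLoop line.toList [] []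

-- ===== PORT B =====
-- state = (cols, cur, pend, delim) exactly as in Source B; cur built as List Char (Python string concat)
def bStep (st : List String × List Char × Bool × String) (ch : Char) :
    List String × List Char × Bool × String :=
  let (cols, cur, pend, delim) := st
  if ch = '\t' then
    if delim ≠ "t" then (cols ++ [pvRstrip cur], [], false, "t") else st
  else if ch = ' ' then
    if delim = "s" then st
    else if pend then (cols ++ [pvRstrip cur], [], false, "s")
    else (cols, cur, true, "")
  else
    (cols, cur ++ (if pend then [' '] else []) ++ [ch], false, "")

def split_columns_py_alt (line : String) : List String :=
  let st := line.toList.foldl bStep ([], [], false, "")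
  pvTrimTail (st.1 ++ [pvRstrip st.2.1])

-- ===== PRECONDITION & SPEC =====
def Spec_split_columns_py (line : String) (out : List String) : Prop := out = split_columns_py_alt line
instance (line : String) (out : List String) : Decidable (Spec_split_columns_py line out) := by unfold Spec_split_columns_py; infer_instance

-- ===== CLAIM (what is proved, stated in full; the proofs are below) =====
def Claim_equal_split_columns_py : Prop := ∀ (line : String), Dom_split_columns_py line → Spec_split_columns_py line (split_columns_py line)

-- ===== LEMMAS AND PROOFS =====

-- B's finalisation applied to a fold state
def bFin (st : List String × List Char × Bool × String) : List String :=
  pvTrimTail (st.1 ++ [pvRstrip st.2.1])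

theorem rstrip_append_space (cs : List Char) :
    PySem.Chars.rstrip (cs ++ [' ']) = PySem.Chars.rstrip cs := by
  simp [PySem.Chars.rstrip, PySem.Chars.isspace]

-- a delimiter-absorbing state ignores further characters of the same run
theorem absorb_run (d : String) (cols : List String)
    (hd : d = "t" ∨ d = "s") :
    ∀ (t r : List Char), (∀ c ∈ t, c = (if d = "t" then '\t' else ' ')) →
    (t ++ r).foldl bStep (cols, [], false, d) = r.foldl bStep (cols, [], false, d) := by
  intro t
  induction t with
  | nil => intro r _; rfl
  | cons c t ih =>
    intro r h
    have hc := h c (by simp)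
    have ht : ∀ c ∈ t, c = (if d = "t" then '\t' else ' ') := fun x hx => h x (by simp [hx])
    rcases hd with hd | hd <;> subst hd <;> simp at hc <;>
      simp [List.foldl_cons, bStep, hc, ih r ht]

-- next char of a dropWhile result fails the predicate
theorem head_dropWhile_false (p : Char → Bool) (xs : List Char) (c : Char)
    (h : (xs.dropWhile p).head? = some c) : p c = false := by
  induction xs with
  | nil => simp at h
  | cons x xs ih =>
    rw [List.dropWhile_cons] at h
    split at h
    · exact ih h
    · simp_all

-- base case: finalisation of both programs from corresponding states
theorem base_fin (cols : List String) (cur : List Char) (pend : Bool)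
    (d : String) :
    aLoop [] cols (cur ++ (if pend then [' '] else [])) = bFin ((cols, cur, pend, d)) := by
  cases pend <;> simp [aLoop, bFin, pvRstrip, rstrip_append_space]

-- main invariant: A's loop state (cols, current) corresponds to B's fold state
-- (cols, cur, pend, delim) with current = cur ++ (pending space), provided the next
-- character does not continue a run that A has already fully consumed.
theorem main_inv (n : Nat) : ∀ (s : List Char), s.length ≤ n →
    ∀ (cols : List String) (cur : List Char) (pend : Bool) (d : String),
    (pend = true → s.head? ≠ some ' ') →
    (d = "t" → s.head? ≠ some '\t') →
    (d = "s" → s.head? ≠ some ' ') →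
    aLoop s cols (cur ++ (if pend then [' '] else [])) = bFin (s.foldl bStep (cols, cur, pend, d)) := by
  induction n with
  | zero =>
    intro s hs cols cur pend d _ _ _
    have : s = [] := List.eq_nil_of_length_eq_zero (Nat.le_zero.mp hs)
    subst this
    exact base_fin cols cur pend d
  | succ n ih =>
    intro s hs cols cur pend d hp ht hds
    match s with
    | [] => exact base_fin cols cur pend d
    | ch :: rest =>
      simp only [List.length_cons, Nat.succ_le_succ_iff] at hs
      have hpv : pvRstrip (cur ++ (if pend then [' '] else [])) = pvRstrip cur := by
        cases pend <;> simp [pvRstrip, rstrip_append_space]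
      by_cases hch : ch = '\t'
      · subst hch
        have hdt : d ≠ "t" := fun h => (ht h) (by simp)
        have hA : aLoop ('\t' :: rest) cols (cur ++ (if pend then [' '] else [])) =
            aLoop (rest.dropWhile (· = '\t')) (cols ++ [pvRstrip cur]) [] := by
          rw [aLoop]; simp [hpv]
        have hB : ('\t' :: rest).foldl bStep (cols, cur, pend, d) =
            (rest.dropWhile (· = '\t')).foldl bStep (cols ++ [pvRstrip cur], [], false, "t") := by
          rw [List.foldl_cons]
          have h1 : bStep (cols, cur, pend, d) '\t' = (cols ++ [pvRstrip cur], [], false, "t") := by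
            simp [bStep, hdt]
          rw [h1]
          conv_lhs => rw [← List.takeWhile_append_dropWhile (p := (· = '\t')) (l := rest)]
          exact absorb_run "t" (cols ++ [pvRstrip cur]) (Or.inl rfl) _ _
            (by intro c hc; simpa using List.mem_takeWhile_imp hc)
        rw [hA, hB]
        have := ih (rest.dropWhile (· = '\t'))
          (le_trans (List.length_dropWhile_le _ _) hs)
          (cols ++ [pvRstrip cur]) [] false "t"
          (by simp)
          (by intro _ hc
              obtain ⟨c, hc', hceq⟩ : ∃ c, ((rest.dropWhile (· = '\t')).head? = some c) ∧ c = '\t' := by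
                cases hh : (rest.dropWhile (· = '\t')).head? with
                | none => simp [hh] at hc
                | some c => exact ⟨c, rfl, by simpa [hh] using hc⟩
              subst hceq
              have := head_dropWhile_false _ _ _ hc'
              simp at this)
          (by intro h; exact absurd h (by decide))
        simpa using this
      · by_cases hsp : ch = ' '
        · subst hsp
          have hpend : pend = false := by
            cases pend
            · rfl
            · exact absurd rfl (hp rfl)
          subst hpend
          have hdns : d ≠ "s" := fun h => (hds h) (by simp)
          match rest with
          | [] =>
            have hA : aLoop [' '] cols (cur ++ (if false then [' '] else [])) =
                aLoop [] cols (cur ++ [' ']) := by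
              conv_lhs => rw [aLoop]
              simp
            rw [hA]
            have hB : [' '].foldl bStep (cols, cur, false, d) = (cols, cur, true, "") := by
              simp [bStep, hdns]
            rw [hB]
            exact base_fin cols cur true ""
          | c2 :: rest2 =>
            simp only [List.length_cons] at hs
            by_cases hc2 : c2 = ' '
            · subst hc2
              have hA : aLoop (' ' :: ' ' :: rest2) cols (cur ++ (if false then [' '] else [])) =
                  aLoop (rest2.dropWhile (· = ' ')) (cols ++ [pvRstrip cur]) [] := by
                rw [aLoop]
                simp
              have hB : (' ' :: ' ' :: rest2).foldl bStep (cols, cur, false, d) =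
                  (rest2.dropWhile (· = ' ')).foldl bStep (cols ++ [pvRstrip cur], [], false, "s") := by
                rw [List.foldl_cons, List.foldl_cons]
                have h1 : bStep (cols, cur, false, d) ' ' = (cols, cur, true, "") := by
                  simp [bStep, hdns]
                have h2 : bStep (cols, cur, true, "") ' ' = (cols ++ [pvRstrip cur], [], false, "s") := by
                  simp [bStep]
                rw [h1, h2]
                conv_lhs => rw [← List.takeWhile_append_dropWhile (p := (· = ' ')) (l := rest2)]
                exact absorb_run "s" (cols ++ [pvRstrip cur]) (Or.inr rfl) _ _
                  (by intro c hc; simpa using List.mem_takeWhile_imp hc)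
              rw [hA, hB]
              have := ih (rest2.dropWhile (· = ' '))
                (le_trans (List.length_dropWhile_le _ _) (by omega))
                (cols ++ [pvRstrip cur]) [] false "s"
                (by simp)
                (by intro h; exact absurd h (by decide))
                (by intro _ hc
                    obtain ⟨c, hc', hceq⟩ : ∃ c, ((rest2.dropWhile (· = ' ')).head? = some c) ∧ c = ' ' := by
                      cases hh : (rest2.dropWhile (· = ' ')).head? with
                      | none => simp [hh] at hc
                      | some c => exact ⟨c, rfl, by simpa [hh] using hc⟩
                    subst hceq
                    have := head_dropWhile_false _ _ _ hc'
                    simp at this)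
              simpa using this
            · -- single space: run == 1
              have hA : aLoop (' ' :: c2 :: rest2) cols (cur ++ (if false then [' '] else [])) =
                  aLoop (c2 :: rest2) cols (cur ++ [' ']) := by
                rw [aLoop]
                simp [hc2]
              rw [hA]
              have hB : (' ' :: c2 :: rest2).foldl bStep (cols, cur, false, d) =
                  (c2 :: rest2).foldl bStep (cols, cur, true, "") := by
                rw [List.foldl_cons]
                have h1 : bStep (cols, cur, false, d) ' ' = (cols, cur, true, "") := by
                  simp [bStep, hdns]
                rw [h1]
              rw [hB]
              have := ih (c2 :: rest2) (by simpa using hs) cols cur true ""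
                (by intro _; simp [hc2])
                (by intro h; exact absurd h (by decide))
                (by intro h; exact absurd h (by decide))
              simpa using this
        · -- ordinary character
          have hA : aLoop (ch :: rest) cols (cur ++ (if pend then [' '] else [])) =
              aLoop rest cols ((cur ++ (if pend then [' '] else []) ++ [ch]) ++ (if false then [' '] else [])) := by
            rw [aLoop]
            simp [hch, hsp]
          have hB : (ch :: rest).foldl bStep (cols, cur, pend, d) =
              rest.foldl bStep (cols, cur ++ (if pend then [' '] else []) ++ [ch], false, "") := by
            rw [List.foldl_cons]
            have h1 : bStep (cols, cur, pend, d) ch =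
                (cols, cur ++ (if pend then [' '] else []) ++ [ch], false, "") := by
              simp [bStep, hch, hsp]
            rw [h1]
          rw [hA, hB]
          exact ih rest hs cols (cur ++ (if pend then [' '] else []) ++ [ch]) false ""
            (by simp)
            (by intro h; exact absurd h (by decide))
            (by intro h; exact absurd h (by decide))

-- ===== VERDICT (by name: the statement is the Claim_ definition above) =====
theorem split_columns_py_spec : Claim_equal_split_columns_py := by
  intro line _
  unfold Spec_split_columns_py split_columns_py split_columns_py_alt
  have h := main_inv line.toList.length line.toList le_rfl [] [] false ""
    (by simp) (by intro h; exact absurd h (by decide)) (by intro h; exact absurd h (by decide))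
  simpa [bFin] using h
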